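-- pv_equiv track=rewrite | github.com/ishansheth/coding_challenges | prob18.py | theGreatXor
-- ===== SOURCE A (Python) =====
-- def theGreatXor(x):
--     i = 0
--     result = 0
--     # Complete this function
--     while(x>>i):
--         if(x>>i & 1 == 0):
--             result = result + 2**(i)
--         i = i+1
--     return result
-- ===== SOURCE B (Python) =====
-- def theGreatXor(x):
--     # Closed form: the all-ones mask of x.bit_length() bits, minus x, sums the powers of two at x zero bits.
--     return ((1 << x.bit_length()) - 1) - x
-- ===== Notes on version B (the rewrite author's own statement) =====
-- stated objective: simpler
-- what changed: Replaced the per-bit while-loop with a closed form: subtract x from the all-ones mask of x's bit length.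
import Mathlib
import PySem

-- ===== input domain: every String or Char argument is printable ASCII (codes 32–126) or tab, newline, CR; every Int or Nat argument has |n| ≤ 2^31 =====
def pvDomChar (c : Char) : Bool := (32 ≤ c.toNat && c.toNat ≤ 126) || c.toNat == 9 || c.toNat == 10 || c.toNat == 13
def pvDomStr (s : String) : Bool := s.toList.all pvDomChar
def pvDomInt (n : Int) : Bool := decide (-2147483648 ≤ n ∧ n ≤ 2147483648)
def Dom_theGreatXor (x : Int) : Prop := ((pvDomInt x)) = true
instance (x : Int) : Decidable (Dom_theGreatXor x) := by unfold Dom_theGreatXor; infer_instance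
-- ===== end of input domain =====

-- ===== PORT A =====
-- B replaces the per-bit while-loop with a closed form; equivalence on nonnegative x (A loops forever on negative x).
-- Fuel makes A's while-loop total: 34 iterations exhaust any x with |x| <= 2^31 (fuel is a totality guard only).
def theGreatXorLoop : Nat → Int → Nat → Int → Int
  | 0, _, _, result => result
  | fuel+1, x, i, result =>
    if x >>> i ≠ 0 then
      theGreatXorLoop fuel x (i+1)
        (if PySem.Int.band (x >>> i) 1 = 0 then result + 2^i else result)
    else result

def theGreatXor (x : Int) : Int := theGreatXorLoop 34 x 0 0

-- ===== PORT B =====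
def theGreatXor_alt (x : Int) : Int := ((1 : Int) <<< PySem.Int.bitLength x) - 1 - x

-- ===== PRECONDITION & SPEC =====
-- Pre_ excludes negative x, where Python A's while-loop never terminates (its shifted value never reaches zero).
def Pre_theGreatXor (x : Int) : Prop := 0 ≤ x
instance (x : Int) : Decidable (Pre_theGreatXor x) := by unfold Pre_theGreatXor; infer_instance
def pvWitness_theGreatXor : Int := (5)
def Spec_theGreatXor (x : Int) (out : Int) : Prop := out = theGreatXor_alt x
instance (x : Int) (out : Int) : Decidable (Spec_theGreatXor x out) := by unfold Spec_theGreatXor; infer_instance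

-- ===== CLAIM (what is proved, stated in full; the proofs are below) =====
def Claim_equal_theGreatXor : Prop := ∀ (x : Int), Dom_theGreatXor x → Pre_theGreatXor x → Spec_theGreatXor x (theGreatXor x)

-- ===== LEMMAS AND PROOFS =====

theorem shiftRight_succ_eq (m : Int) (i : Nat) : m >>> (i+1) = PySem.Int.floordiv (m >>> i) 2 := by
  rw [PySem.Int.floordiv_eq_ediv_of_pos (by norm_num)]
  simp [Int.shiftRight_eq_div_pow, pow_succ,
    ← Int.ediv_ediv_of_nonneg (x := m) (by positivity : (0:Int) ≤ 2^i)]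

theorem shiftRight_nonneg {m : Int} (h : 0 ≤ m) (i : Nat) : 0 ≤ m >>> i := by
  rw [Int.shiftRight_eq_div_pow]
  exact Int.ediv_nonneg h (by positivity)

-- loop invariant: with enough fuel, the loop adds 2^i * (2^bitLength y - 1 - y) for y = x >>> i
theorem theGreatXorLoop_eq : ∀ (fuel : Nat) (x : Int) (i : Nat) (r : Int), 0 ≤ x →
    x >>> (i + fuel) = 0 →
    theGreatXorLoop fuel x i r = r + 2^i * (2 ^ PySem.Int.bitLength (x >>> i) - 1 - (x >>> i)) := by
  intro fuel
  induction fuel with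
  | zero =>
    intro x i r hx h0
    simp only [Nat.add_zero] at h0
    simp [theGreatXorLoop, h0, PySem.Int.bitLength_zero]
  | succ f ih =>
    intro x i r hx h0
    by_cases hy : x >>> i = 0
    · simp [theGreatXorLoop, hy, PySem.Int.bitLength_zero]
    · have hypos : 0 < x >>> i := lt_of_le_of_ne (shiftRight_nonneg hx i) (Ne.symm hy)
      have hstep : x >>> (i+1) = PySem.Int.floordiv (x >>> i) 2 := shiftRight_succ_eq x i
      have hfuel : x >>> ((i+1) + f) = 0 := by
        rw [show (i+1) + f = i + (f+1) from by omega]; exact h0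
      have hrec := ih x (i+1) (if PySem.Int.band (x >>> i) 1 = 0 then r + 2^i else r) hx hfuel
      rw [theGreatXorLoop, if_pos hy, hrec, hstep]
      have hL : 1 ≤ PySem.Int.bitLength (x >>> i) := by
        rw [PySem.Int.bitLength_of_pos hypos]; omega
      have hL' : PySem.Int.bitLength (PySem.Int.floordiv (x >>> i) 2)
          = PySem.Int.bitLength (x >>> i) - 1 := by
        rw [PySem.Int.bitLength_of_pos hypos]
        omega
      rw [hL']
      have h2L : (2:Int) ^ PySem.Int.bitLength (x >>> i) =
          2 * 2 ^ (PySem.Int.bitLength (x >>> i) - 1) := by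
        rw [← pow_succ']
        congr 1
        omega
      have hdm := PySem.Int.floordiv_mul_add_mod (x >>> i) 2
      have hmod : PySem.Int.mod (x >>> i) 2 = 0 ∨ PySem.Int.mod (x >>> i) 2 = 1 := by
        have h1 := PySem.Int.mod_nonneg (x >>> i) (b := 2) (by norm_num)
        have h2 := PySem.Int.mod_lt (x >>> i) (b := 2) (by norm_num)
        omega
      rw [PySem.Int.band_one]
      rcases hmod with hm | hm
      · rw [if_pos hm]
        rw [hm] at hdm
        rw [h2L]
        linear_combination (-(2:Int)^i) * hdm
      · rw [if_neg (by rw [hm]; norm_num)]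
        rw [hm] at hdm
        rw [h2L]
        linear_combination (-(2:Int)^i) * hdm

theorem shiftRight_34_eq_zero {x : Int} (h0 : 0 ≤ x) (h1 : x ≤ 2147483648) :
    x >>> ((0 : Nat) + 34) = 0 := by
  rw [Int.shiftRight_eq_div_pow]
  exact Int.ediv_eq_zero_of_lt h0 (by norm_num; omega)

-- ===== VERDICT (by name: the statement is the Claim_ definition above) =====
theorem theGreatXor_spec : Claim_equal_theGreatXor := by
  intro x hdom hpre
  unfold Spec_theGreatXor theGreatXor theGreatXor_alt
  have hdom' : x ≤ 2147483648 := by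
    simp only [Dom_theGreatXor, pvDomInt, decide_eq_true_eq] at hdom
    exact hdom.2
  rw [theGreatXorLoop_eq 34 x 0 0 hpre (shiftRight_34_eq_zero hpre hdom')]
  have hx0 : x >>> (0 : Nat) = x := by
    rw [Int.shiftRight_eq_div_pow]; simp
  rw [hx0]
  rw [Int.shiftLeft_eq]
  ring
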